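-- pv_equiv track=rewrite | github.com/otabek-a/dictionary_beginner_homework | find_max_key.py | find_max_key
-- ===== SOURCE A (Python) =====
-- def find_max_key(data: dict):
--     """
--     Return the maximum int or float key in a dictionary.
--     Args:
--         data (dict): A dictionary of values
--     Returns:
--         int: The maximum key in the dictionary.
--     """
--     l=[]
--     for i in data.keys():
--         l.append(i)
--     max=l[0]
--     for i in l:
--         if max<i:
--             max=i
--     return max
-- ===== SOURCE B (Python) =====
-- def find_max_key(data: dict):
--     """Sort the keys and take the last one (same IndexError as A on an empty dict)."""
--     return sorted(data)[-1]
-- ===== Notes on version B (the rewrite author's own statement) =====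
-- stated objective: simpler
-- what changed: Replaces the manual key-copy loop and running-max scan with a one-line sort-then-last-element strategy (sorted(data)[-1]).
import Mathlib
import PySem

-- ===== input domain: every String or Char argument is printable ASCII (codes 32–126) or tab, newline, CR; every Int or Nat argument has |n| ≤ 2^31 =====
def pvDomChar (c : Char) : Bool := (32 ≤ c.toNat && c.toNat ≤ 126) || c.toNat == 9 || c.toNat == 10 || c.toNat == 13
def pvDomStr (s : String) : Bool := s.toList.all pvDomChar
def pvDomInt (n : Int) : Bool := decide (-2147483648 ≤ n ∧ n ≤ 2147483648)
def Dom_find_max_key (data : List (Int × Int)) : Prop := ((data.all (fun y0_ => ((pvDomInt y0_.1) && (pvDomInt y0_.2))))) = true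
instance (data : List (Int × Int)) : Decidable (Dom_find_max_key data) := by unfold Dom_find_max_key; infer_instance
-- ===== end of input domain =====

-- B replaces A's key-copy loop and running-max scan with sort-then-last-element (simpler decomposition, not faster).


-- ===== PORT A =====
-- A: copy data.keys() into l, take l[0] (IndexError on empty dict → Pre_), then a running-max scan over l.
-- (a Python dict's keys are exactly the association list's keys, in order; they are distinct in a real dict)
def find_max_key (data : List (Int × Int)) : Int :=
  let l : List Int := data.foldl (fun acc i => acc ++ [i.1]) []   -- for i in data.keys(): l.append(i)
  match l with
  | [] => 0                                                        -- l[0] raises IndexError; excluded by Pre_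
  | m :: _ =>
    l.foldl (fun mx i => if mx < i then i else mx) m               -- for i in l: if max < i: max = i

-- ===== PORT B =====
-- B: return sorted(data)[-1]   (sorted over a dict iterates its keys)
def find_max_key_alt (data : List (Int × Int)) : Int :=
  let ks := PySem.List.sorted (data.map (·.1)) (fun x => x) false
  (PySem.List.pyGet? ks (-1)).getD 0                               -- none = IndexError on empty; excluded by Pre_

-- ===== PRECONDITION & SPEC =====
-- A raises IndexError on the empty dict (l[0]); B raises IndexError there too (sorted(data)[-1]).
def Pre_find_max_key (data : List (Int × Int)) : Prop := data ≠ []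
instance (data : List (Int × Int)) : Decidable (Pre_find_max_key data) := by unfold Pre_find_max_key; infer_instance
def pvWitness_find_max_key : (List (Int × Int)) := [(3, 1), (7, 2), (5, 3)]

def Spec_find_max_key (data : List (Int × Int)) (out : Int) : Prop := out = find_max_key_alt data
instance (data : List (Int × Int)) (out : Int) : Decidable (Spec_find_max_key data out) := by unfold Spec_find_max_key; infer_instance

-- ===== CLAIM (what is proved, stated in full; the proofs are below) =====
def Claim_equal_find_max_key : Prop := ∀ (data : List (Int × Int)), Dom_find_max_key data → Pre_find_max_key data → Spec_find_max_key data (find_max_key data)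

-- ===== LEMMAS AND PROOFS =====

-- A's branch test is the max function
theorem if_lt_eq_max (a b : Int) : (if a < b then b else a) = max a b := by
  rw [max_def]; split <;> split <;> omega

-- every element of a ≤-sorted list is ≤ its last element
theorem le_getLast_of_pairwise (s : List Int) (h : s ≠ []) (hp : s.Pairwise (· ≤ ·)) :
    ∀ x ∈ s, x ≤ s.getLast h := by
  induction s with
  | nil => simp at h
  | cons a t ih =>
    intro x hx
    rcases hp with - | ⟨ha, hpt⟩
    cases t with
    | nil => simp at hx; simp [hx]
    | cons b u =>
      rw [List.getLast_cons (by simp)]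
      rcases List.mem_cons.mp hx with rfl | hx'
      · exact le_trans (ha _ (List.getLast_mem _)) (le_refl _)
      · exact ih (by simp) hpt x hx'

-- the core: running max over m :: rest = last of the sorted copy of m :: rest
theorem scan_eq_sorted_last (m : Int) (rest : List Int) :
    (m :: rest).foldl (fun mx i => if mx < i then i else mx) m
      = (PySem.List.pyGet? (PySem.List.sorted (m :: rest) (fun x => x) false) (-1)).getD 0 := by
  have hstep : (fun mx i : Int => if mx < i then i else mx) = max := by
    funext a b; exact if_lt_eq_max a b
  rw [hstep]
  have hA : (m :: rest).foldl max m = rest.foldl max m := by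
    simp [List.foldl_cons]
  set s := PySem.List.sorted (m :: rest) (fun x => x) false with hs
  have hperm : s.Perm (m :: rest) := PySem.List.sorted_perm _ _ _
  have hne : s ≠ [] := by
    intro h0; have := hperm.length_eq; simp [h0] at this
  have hpair : s.Pairwise (· ≤ ·) := PySem.List.sorted_pairwise (m :: rest) (fun x => x)
  rw [PySem.List.pyGet?_neg_one, List.getLast?_eq_some_getLast hne, Option.getD_some, hA]
  -- antisymmetry between the two maxima
  have hmax := PySem.List.le_foldl_max rest m
  have hlast_mem : s.getLast hne ∈ (m :: rest) := hperm.mem_iff.mp (List.getLast_mem hne)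
  have h1 : s.getLast hne ≤ rest.foldl max m := by
    rcases List.mem_cons.mp hlast_mem with h | h
    · rw [h]; exact hmax.1
    · exact hmax.2 _ h
  have hfold_mem : rest.foldl max m ∈ (m :: rest) := by
    rcases PySem.List.foldl_max_mem rest m with h | h
    · rw [h]; exact List.mem_cons_self
    · exact List.mem_cons_of_mem _ h
  have h2 : rest.foldl max m ≤ s.getLast hne :=
    le_getLast_of_pairwise s hne hpair _ (hperm.mem_iff.mpr hfold_mem)
  omega

-- ===== VERDICT (by name: the statement is the Claim_ definition above) =====
theorem find_max_key_spec : Claim_equal_find_max_key := by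
  intro data _ hpre
  unfold Spec_find_max_key find_max_key find_max_key_alt
  have hl : data.foldl (fun acc i => acc ++ [i.1]) [] = data.map (·.1) := by
    simpa using PySem.List.foldl_append_singleton_eq_map (fun i : Int × Int => i.1) data []
  rw [hl]
  cases hkeys : data.map (·.1) with
  | nil => exact absurd (List.map_eq_nil_iff.mp hkeys) hpre
  | cons m rest => exact scan_eq_sorted_last m rest
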